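-- pv_equiv track=rewrite | github.com/YuriyLenchenkov/Homework | hw11.py | list_letters
-- ===== SOURCE A (Python) =====
-- def list_letters(first, last, step=1):
--     a = "abcdefghijklmnopqrstuvwxyz"
--     first_index = list(a).index(first)
--     last_index = list(a).index(last)
--     l = []
--     if int(step) > 0:
--         position = first_index
--         while position <= last_index:
--             l.append(a[position])
--             position = (position + int(step))
--         return l
--     elif int(step) < 0:
--         position = first_index
--         while position >= last_index:
--             l.append(a[position])
--             position = (position - abs(int(step)))
--         return l
-- ===== SOURCE B (Python) =====
-- def list_letters(first, last, step=1):
--     s = int(step)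
--     if s == 0:
--         return None
--     a = "abcdefghijklmnopqrstuvwxyz"
--     first_index = list(a).index(first)
--     last_index = list(a).index(last)
--     if s > 0:
--         return list(a[first_index:last_index + 1:s])
--     stop = last_index - 1 if last_index > 0 else None
--     return list(a[first_index:stop:s])
-- ===== Notes on version B (the rewrite author's own statement) =====
-- stated objective: idiomatic
-- what changed: Replaces A's two counter-driven while loops with a single closed-form Python slice a[first_index:stop:step] (stop = last_index+1 for positive step, last_index-1-or-None for negative step).
-- outside the precondition, e.g. on list_letters('a', 'c', 0): A returns None, B returns None
import Mathlib
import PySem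

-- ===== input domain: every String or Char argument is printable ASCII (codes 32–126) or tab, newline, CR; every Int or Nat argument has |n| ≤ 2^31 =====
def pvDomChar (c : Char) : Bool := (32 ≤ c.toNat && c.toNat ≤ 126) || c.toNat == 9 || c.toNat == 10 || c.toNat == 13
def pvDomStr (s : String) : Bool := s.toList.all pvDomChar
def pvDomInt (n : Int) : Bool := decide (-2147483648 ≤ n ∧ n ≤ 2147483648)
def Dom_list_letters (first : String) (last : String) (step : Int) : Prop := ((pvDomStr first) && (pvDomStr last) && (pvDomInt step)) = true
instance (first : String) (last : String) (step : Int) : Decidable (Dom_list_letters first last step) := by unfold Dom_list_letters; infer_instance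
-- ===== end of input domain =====

-- B replaces A's two counter-driven while loops with one closed-form slice of the alphabet (idiomatic, same cost).


-- ===== PORT A =====
-- list(a) for a = "abcdefghijklmnopqrstuvwxyz": the 26 one-character strings
def pvAlpha : List String :=
  ["a","b","c","d","e","f","g","h","i","j","k","l","m",
   "n","o","p","q","r","s","t","u","v","w","x","y","z"]

-- 'while position <= last_index: l.append(a[position]); position += int(step)'  (int(step) = step here).
-- The '0 < step' conjunct only records the branch condition under which A runs this loop (termination);
-- the 'none' arm of a[position] is Python's IndexError, never reached on admitted inputs.
def pvLoopUp (xs : List String) (lastIdx step position : Int) (l : List String) : List String :=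
  if h : position ≤ lastIdx ∧ 0 < step then
    match PySem.List.pyGet? xs position with
    | some c => pvLoopUp xs lastIdx step (position + step) (l ++ [c])
    | none => l
  else l
termination_by (lastIdx + 1 - position).toNat
decreasing_by omega

-- 'while position >= last_index: l.append(a[position]); position -= abs(int(step))'
def pvLoopDown (xs : List String) (lastIdx step position : Int) (l : List String) : List String :=
  if h : lastIdx ≤ position ∧ step < 0 then
    match PySem.List.pyGet? xs position with
    | some c => pvLoopDown xs lastIdx step (position - |step|) (l ++ [c])
    | none => l
  else l
termination_by (position + 1 - lastIdx).toNat
decreasing_by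
  have habs : |step| = -step := abs_of_neg h.2
  omega

def list_letters (first : String) (last : String) (step : Int) : List String :=
  match PySem.List.index? pvAlpha first, PySem.List.index? pvAlpha last with
  | some first_index, some last_index =>
    if 0 < step then pvLoopUp pvAlpha (last_index : Int) step (first_index : Int) []
    else if step < 0 then pvLoopDown pvAlpha (last_index : Int) step (first_index : Int) []
    else []  -- step == 0: Python returns None (outside Pre_)
  | _, _ => []  -- ValueError from .index (outside Pre_)

-- ===== PORT B =====
-- B's own copy of the alphabet "abcdefghijklmnopqrstuvwxyz" as list(a)
def pvAlphaB : List String :=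
  ["a","b","c","d","e","f","g","h","i","j","k","l","m",
   "n","o","p","q","r","s","t","u","v","w","x","y","z"]

def list_letters_alt (first : String) (last : String) (step : Int) : List String :=
  if step = 0 then []  -- Python B returns None (outside Pre_)
  else
    match PySem.List.index? pvAlphaB first with
    | none => []  -- ValueError from .index (outside Pre_)
    | some first_index =>
      match PySem.List.index? pvAlphaB last with
      | none => []  -- ValueError from .index (outside Pre_)
      | some last_index =>
        if 0 < step then
          (PySem.List.slice? pvAlphaB (some (first_index : Int)) (some ((last_index : Int) + 1)) step).getD []
        else
          (PySem.List.slice? pvAlphaB (some (first_index : Int))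
            (if 0 < last_index then some ((last_index : Int) - 1) else none) step).getD []

-- ===== PRECONDITION & SPEC =====
-- Pre_ excludes exactly the inputs on which A does not return a list: step == 0 (A falls through both
-- branches and returns None, not a list — B does the same) and first/last not a single lowercase letter
-- (list(a).index raises ValueError in both A and B).
def pvAlphabetPre : List String :=
  ["a","b","c","d","e","f","g","h","i","j","k","l","m",
   "n","o","p","q","r","s","t","u","v","w","x","y","z"]
def Pre_list_letters (first : String) (last : String) (step : Int) : Prop :=
  first ∈ pvAlphabetPre ∧ last ∈ pvAlphabetPre ∧ step ≠ 0
instance (first : String) (last : String) (step : Int) : Decidable (Pre_list_letters first last step) := by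
  unfold Pre_list_letters; infer_instance

def pvWitness_list_letters : String × String × Int := ("b", "y", 3)

def Spec_list_letters (first : String) (last : String) (step : Int) (out : List String) : Prop := out = list_letters_alt first last step
instance (first : String) (last : String) (step : Int) (out : List String) : Decidable (Spec_list_letters first last step out) := by unfold Spec_list_letters; infer_instance

-- ===== CLAIM (what is proved, stated in full; the proofs are below) =====
def Claim_equal_list_letters : Prop := ∀ (first : String) (last : String) (step : Int), Dom_list_letters first last step → Pre_list_letters first last step → Spec_list_letters first last step (list_letters first last step)

-- ===== LEMMAS AND PROOFS =====

-- ceiling-style quotient is 1 on [s, 2s)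
theorem pv_ediv_eq_one (M s : Int) (h0 : 0 < s) (h1 : s ≤ M) (h2 : M < 2 * s) : M / s = 1 := by
  have key := Int.add_mul_ediv_right (M - s) 1 (by omega : s ≠ 0)
  have harg : M - s + 1 * s = M := by ring
  rw [harg] at key
  rw [key, Int.ediv_eq_zero_of_lt (by omega) (by omega)]
  omega

-- A's ascending loop produces the closed-form index list of the slice.
theorem pv_up_eq (xs : List String) (step lastIdx : Int) (hs : 0 < step)
    (hl : lastIdx < (xs.length : Int)) :
    ∀ (count : Nat) (position : Int) (l : List String), 0 ≤ position →
      count = (if position ≤ lastIdx then ((lastIdx + 1 - position + step - 1) / step).toNat else 0) →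
      pvLoopUp xs lastIdx step position l =
        l ++ (List.range count).filterMap (fun (k : Nat) => xs[(position + step * (k : Int)).toNat]?) := by
  intro count
  induction count with
  | zero =>
    intro position l hpos hc
    have hgt : ¬ position ≤ lastIdx := by
      intro hle
      rw [if_pos hle] at hc
      have h1 : (1 : Int) ≤ (lastIdx + 1 - position + step - 1) / step := by
        rw [Int.le_ediv_iff_mul_le hs]; omega
      omega
    rw [pvLoopUp]
    simp [hgt]
  | succ n ih =>
    intro position l hpos hc
    have hle : position ≤ lastIdx := by
      by_contra hgt
      rw [if_neg hgt] at hc; omega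
    rw [if_pos hle] at hc
    set M : Int := lastIdx + 1 - position + step - 1 with hM
    have hMs : step ≤ M := by omega
    obtain ⟨p, rfl⟩ := Int.eq_ofNat_of_zero_le hpos
    have hplen : p < xs.length := by omega
    have hget : PySem.List.pyGet? xs (p : Int) = some xs[p] := by
      rw [PySem.List.pyGet?_natCast]
      exact List.getElem?_eq_getElem hplen
    rw [pvLoopUp, dif_pos ⟨hle, hs⟩, hget]
    have hred : (match some xs[p] with
        | some c => pvLoopUp xs lastIdx step ((p : Int) + step) (l ++ [c])
        | none => l) = pvLoopUp xs lastIdx step ((p : Int) + step) (l ++ [xs[p]]) := rfl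
    rw [hred]
    rw [List.range_succ_eq_map, List.filterMap_cons, List.filterMap_map]
    have h0 : xs[((p : Int) + step * ((0 : Nat) : Int)).toNat]? = some xs[p] := by
      simp [List.getElem?_eq_getElem hplen]
    rw [h0]
    have hfg : (List.range n).filterMap
          ((fun (k : Nat) => xs[((p : Int) + step * (k : Int)).toNat]?) ∘ Nat.succ)
        = (List.range n).filterMap
          (fun (k : Nat) => xs[(((p : Int) + step) + step * (k : Int)).toNat]?) := by
      apply List.filterMap_congr
      intro k _
      simp only [Function.comp_apply]
      congr 2
      push_cast
      ring
    rw [hfg]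
    rw [ih ((p : Int) + step) (l ++ [xs[p]]) (by omega) (by
      by_cases h2 : (p : Int) + step ≤ lastIdx
      · rw [if_pos h2]
        have hM' : lastIdx + 1 - ((p : Int) + step) + step - 1 = M - step := by omega
        rw [hM']
        have key := Int.add_mul_ediv_right (M - step) 1 (by omega : step ≠ 0)
        have harg : M - step + 1 * step = M := by ring
        rw [harg] at key
        have hq : (0 : Int) ≤ (M - step) / step :=
          Int.ediv_nonneg (by omega) (by omega)
        omega
      · rw [if_neg h2]
        have h1 : M / step = 1 := pv_ediv_eq_one M step hs hMs (by omega)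
        omega)]
    simp

-- A's descending loop produces the closed-form index list of the negative-step slice.
theorem pv_down_eq (xs : List String) (step lastIdx : Int) (hs : step < 0)
    (hl0 : 0 ≤ lastIdx) :
    ∀ (count : Nat) (position : Int) (l : List String), position < (xs.length : Int) →
      count = (if lastIdx ≤ position then ((position - lastIdx + 1 + -step - 1) / (-step)).toNat else 0) →
      pvLoopDown xs lastIdx step position l =
        l ++ (List.range count).filterMap (fun (k : Nat) => xs[(position + step * (k : Int)).toNat]?) := by
  intro count
  induction count with
  | zero =>
    intro position l hpos hc
    have hgt : ¬ lastIdx ≤ position := by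
      intro hle
      rw [if_pos hle] at hc
      have h1 : (1 : Int) ≤ (position - lastIdx + 1 + -step - 1) / (-step) := by
        rw [Int.le_ediv_iff_mul_le (by omega : (0:Int) < -step)]; omega
      omega
    rw [pvLoopDown]
    simp [hgt]
  | succ n ih =>
    intro position l hpos hc
    have hle : lastIdx ≤ position := by
      by_contra hgt
      rw [if_neg hgt] at hc; omega
    rw [if_pos hle] at hc
    set M : Int := position - lastIdx + 1 + -step - 1 with hM
    have hMs : -step ≤ M := by omega
    have hposnn : 0 ≤ position := by omega
    obtain ⟨p, rfl⟩ := Int.eq_ofNat_of_zero_le hposnn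
    have hplen : p < xs.length := by omega
    have hget : PySem.List.pyGet? xs (p : Int) = some xs[p] := by
      rw [PySem.List.pyGet?_natCast]
      exact List.getElem?_eq_getElem hplen
    have habs : |step| = -step := abs_of_neg hs
    rw [pvLoopDown, dif_pos ⟨hle, hs⟩, hget]
    have hred : (match some xs[p] with
        | some c => pvLoopDown xs lastIdx step ((p : Int) - |step|) (l ++ [c])
        | none => l) = pvLoopDown xs lastIdx step ((p : Int) - |step|) (l ++ [xs[p]]) := rfl
    rw [hred]
    rw [List.range_succ_eq_map, List.filterMap_cons, List.filterMap_map]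
    have h0 : xs[((p : Int) + step * ((0 : Nat) : Int)).toNat]? = some xs[p] := by
      simp [List.getElem?_eq_getElem hplen]
    rw [h0]
    have hfg : (List.range n).filterMap
          ((fun (k : Nat) => xs[((p : Int) + step * (k : Int)).toNat]?) ∘ Nat.succ)
        = (List.range n).filterMap
          (fun (k : Nat) => xs[(((p : Int) - |step|) + step * (k : Int)).toNat]?) := by
      apply List.filterMap_congr
      intro k _
      simp only [Function.comp_apply, habs]
      congr 2
      push_cast
      ring
    rw [hfg]
    rw [ih ((p : Int) - |step|) (l ++ [xs[p]]) (by omega) (by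
      rw [habs]
      by_cases h2 : lastIdx ≤ (p : Int) - -step
      · rw [if_pos h2]
        have hM' : (p : Int) - -step - lastIdx + 1 + -step - 1 = M - -step := by omega
        rw [hM']
        have key := Int.add_mul_ediv_right (M - -step) 1 (by omega : -step ≠ 0)
        have harg : M - -step + 1 * -step = M := by ring
        rw [harg] at key
        have hq : (0 : Int) ≤ (M - -step) / (-step) :=
          Int.ediv_nonneg (by omega) (by omega)
        omega
      · rw [if_neg h2]
        have h1 : M / (-step) = 1 := pv_ediv_eq_one M (-step) (by omega) hMs (by omega)
        omega)]
    simp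

-- the positive-step slice, computed
theorem pv_slice_pos (xs : List String) (i j : Nat) (step : Int) (hs : 0 < step)
    (hi : i < xs.length) (hj : j < xs.length) :
    (PySem.List.slice? xs (some (i : Int)) (some ((j : Int) + 1)) step).getD [] =
      (List.range (if (i : Int) ≤ (j : Int) then (((j : Int) + 1 - (i : Int) + step - 1) / step).toNat else 0)).filterMap
        (fun (k : Nat) => xs[((i : Int) + step * (k : Int)).toNat]?) := by
  have hs0 : ¬ step = 0 := by omega
  have hsneg : ¬ step < 0 := by omega
  simp only [PySem.List.slice?, PySem.List.sliceIndices, hs0, hsneg, if_false]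
  have hclampi : ¬ ((i : Int) < 0) := by omega
  have hclampj : ¬ ((j : Int) + 1 < 0) := by omega
  simp only [hclampi, hclampj, if_false]
  have hmi : min (i : Int) (xs.length : Int) = (i : Int) := by omega
  have hmj : min ((j : Int) + 1) (xs.length : Int) = (j : Int) + 1 := by omega
  simp only [hmi, hmj]
  rw [if_pos hs]
  have hiff : ((i : Int) < (j : Int) + 1) = ((i : Int) ≤ (j : Int)) := by
    apply propext; omega
  simp only [hiff, Option.getD_some]

-- the negative-step slice, computed (stop index is uniformly j-1: None stands for -1 when j = 0)
theorem pv_slice_neg (xs : List String) (i j : Nat) (step : Int) (hs : step < 0)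
    (hi : i < xs.length) (hj : j < xs.length) :
    (PySem.List.slice? xs (some (i : Int)) (if 0 < j then some ((j : Int) - 1) else none) step).getD [] =
      (List.range (if (j : Int) ≤ (i : Int) then (((i : Int) - ((j : Int) - 1) + -step - 1) / (-step)).toNat else 0)).filterMap
        (fun (k : Nat) => xs[((i : Int) + step * (k : Int)).toNat]?) := by
  have hs0 : ¬ step = 0 := by omega
  have hnpos : ¬ (0 < step) := by omega
  have hclampi : ¬ ((i : Int) < 0) := by omega
  have hmi : min (i : Int) ((xs.length : Int) - 1) = (i : Int) := by omega
  by_cases hjpos : 0 < j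
  · have hclampj : ¬ ((j : Int) - 1 < 0) := by omega
    have hmj : min ((j : Int) - 1) ((xs.length : Int) - 1) = (j : Int) - 1 := by omega
    simp only [PySem.List.slice?, PySem.List.sliceIndices, hs0, hs, hjpos, if_true, if_false,
      hclampi, hclampj, hmi, hmj]
    rw [if_neg hnpos]
    have hiff : ((j : Int) - 1 < (i : Int)) = ((j : Int) ≤ (i : Int)) := by
      apply propext; omega
    simp only [hiff, Option.getD_some]
  · have hj0 : j = 0 := by omega
    subst hj0
    simp only [PySem.List.slice?, PySem.List.sliceIndices, hs0, hs, hjpos, if_true, if_false,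
      hclampi, hmi, Nat.cast_zero, zero_sub]
    rw [if_neg hnpos]
    have hiff : ((-1 : Int) < (i : Int)) = ((0 : Int) ≤ (i : Int)) := by
      apply propext; omega
    simp only [hiff, Option.getD_some]

-- ===== VERDICT (by name: the statement is the Claim_ definition above) =====
theorem list_letters_spec : Claim_equal_list_letters := by
  intro first last step _ hpre
  obtain ⟨hf, hl, hs0⟩ := hpre
  unfold Spec_list_letters list_letters list_letters_alt
  have hBA : pvAlphaB = pvAlpha := by rfl
  rw [hBA]
  have hf' : first ∈ pvAlpha := hf
  have hl' : last ∈ pvAlpha := hl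
  cases hfi : PySem.List.index? pvAlpha first with
  | none => exact absurd hf' ((PySem.List.index?_eq_none_iff _ _).mp hfi)
  | some fi =>
  cases hli : PySem.List.index? pvAlpha last with
  | none => exact absurd hl' ((PySem.List.index?_eq_none_iff _ _).mp hli)
  | some li =>
  obtain ⟨hfilt, -, -⟩ := PySem.List.getElem_of_index?_eq_some hfi
  obtain ⟨hlilt, -, -⟩ := PySem.List.getElem_of_index?_eq_some hli
  simp only []
  rw [if_neg hs0]
  by_cases hpos : 0 < step
  · rw [if_pos hpos, if_pos hpos]
    rw [pv_up_eq pvAlpha step (li : Int) hpos (by exact_mod_cast hlilt) _ (fi : Int) [] (by omega) rfl]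
    rw [pv_slice_pos pvAlpha fi li step hpos hfilt hlilt]
    simp only [List.nil_append]
  · have hneg : step < 0 := by omega
    rw [if_neg hpos, if_neg hpos, if_pos hneg]
    rw [pv_down_eq pvAlpha step (li : Int) hneg (by omega) _ (fi : Int) [] (by exact_mod_cast hfilt) rfl]
    rw [pv_slice_neg pvAlpha fi li step hneg hfilt hlilt]
    simp only [List.nil_append]
    have hcnt : (if (li : Int) ≤ (fi : Int) then (((fi : Int) - (li : Int) + 1 + -step - 1) / (-step)).toNat else 0)
        = (if (li : Int) ≤ (fi : Int) then (((fi : Int) - ((li : Int) - 1) + -step - 1) / (-step)).toNat else 0) := by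
      by_cases hfl : (li : Int) ≤ (fi : Int)
      · rw [if_pos hfl, if_pos hfl]
        have hnum : ((fi : Int) - (li : Int) + 1 + -step - 1) = ((fi : Int) - ((li : Int) - 1) + -step - 1) := by ring
        rw [hnum]
      · rw [if_neg hfl, if_neg hfl]
    rw [hcnt]
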